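-- pv_equiv track=rewrite | github.com/dmk28/7thSea | world/utils/format.py | convert_mush_tokens
-- ===== SOURCE A (Python) =====
-- def convert_mush_tokens(text):
--     """Convert MUSH-style tokens to Evennia-compatible formatting."""
--     conversions = {
--         '%r': '\n',  # Carriage return
--         '%t': '    ',  # Tab (4 spaces)
--         '%b': ' ',  # Space
--         '%cr': '|r',  # Red color
--         '%cg': '|g',  # Green color
--         '%cy': '|y',  # Yellow color
--         '%cb': '|b',  # Blue color
--         '%cm': '|m',  # Magenta color
--         '%cc': '|c',  # Cyan color
--         '%cw': '|w',  # White color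
--         '%cn': '|n',  # Reset color
--         '%ch': '|h',  # Highlight
--         '%cx': '|x',  # Black color
--     }
--
--     for token, replacement in conversions.items():
--         text = text.replace(token, replacement)
--
--     return text
-- ===== SOURCE B (Python) =====
-- import re
--
-- _CONVERSIONS = {
--     '%r': '\n',
--     '%t': '    ',
--     '%b': ' ',
--     '%cr': '|r',
--     '%cg': '|g',
--     '%cy': '|y',
--     '%cb': '|b',
--     '%cm': '|m',
--     '%cc': '|c',
--     '%cw': '|w',
--     '%cn': '|n',
--     '%cx': '|x',
--     '%ch': '|h',
-- }
--
-- _PATTERN = re.compile('|'.join(re.escape(token) for token in _CONVERSIONS))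
--
--
-- def convert_mush_tokens(text):
--     """Convert MUSH-style tokens to Evennia-compatible formatting."""
--     return _PATTERN.sub(lambda m: _CONVERSIONS[m.group()], text)
-- ===== Notes on version B (the rewrite author's own statement) =====
-- stated objective: faster
-- what changed: Replaces the 13 sequential full-string str.replace passes with one compiled regex alternation that scans the text once left-to-right, substituting each token via a dict lookup in the match callback.
import Mathlib
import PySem

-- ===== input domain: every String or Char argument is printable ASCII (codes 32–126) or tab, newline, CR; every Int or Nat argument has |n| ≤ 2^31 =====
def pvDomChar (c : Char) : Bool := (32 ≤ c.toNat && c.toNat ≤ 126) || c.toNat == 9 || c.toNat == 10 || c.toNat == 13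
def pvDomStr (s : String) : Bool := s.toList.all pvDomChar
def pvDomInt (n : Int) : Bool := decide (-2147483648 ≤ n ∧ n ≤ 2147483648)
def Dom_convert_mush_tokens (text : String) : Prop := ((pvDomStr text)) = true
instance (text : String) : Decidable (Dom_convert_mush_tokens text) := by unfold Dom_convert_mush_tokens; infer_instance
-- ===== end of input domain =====

-- B replaces A's 13 sequential full-string replace passes with ONE left-to-right scan
-- (a compiled regex alternation in Source B), substituting each token as it is met; objective: faster (constant factor).

-- ===== PORT A =====
-- the dict literal in insertion order; the for-loop over .items() is the foldl below
def convert_mush_tokens (text : String) : String :=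
  ([("%r", "\n"), ("%t", "    "), ("%b", " "), ("%cr", "|r"), ("%cg", "|g"),
    ("%cy", "|y"), ("%cb", "|b"), ("%cm", "|m"), ("%cc", "|c"), ("%cw", "|w"),
    ("%cn", "|n"), ("%ch", "|h"), ("%cx", "|x")] : List (String × String)).foldl
    (fun t p => PySem.Str.replace t p.1 p.2) text

-- ===== PORT B =====
-- Hand port of _PATTERN.sub in Source B (Lean has no regex): re.sub scans left to right and, at each
-- position, substitutes the first alternative of '%r|%t|%b|%cr|%cg|%cy|%cb|%cm|%cc|%cw|%cn|%cx|%ch'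
-- that matches (at most one can), else keeps the character and moves on — exact for this pattern,
-- whose alternatives are disjoint fixed tokens with no regex metacharacters.
def goB : List Char → List Char
  | [] => []
  | c :: rest =>
    if c = '%' then
      match rest with
      | [] => ['%']
      | d :: rest2 =>
        if d = 'r' then '\n' :: goB rest2
        else if d = 't' then ' ' :: ' ' :: ' ' :: ' ' :: goB rest2
        else if d = 'b' then ' ' :: goB rest2
        else if d = 'c' then
          match rest2 with
          | [] => '%' :: goB [d]
          | e :: rest3 =>
            if e = 'r' ∨ e = 'g' ∨ e = 'y' ∨ e = 'b' ∨ e = 'm' ∨ e = 'c' ∨ e = 'w' ∨ e = 'n' ∨ e = 'x' ∨ e = 'h'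
            then '|' :: e :: goB rest3
            else '%' :: goB (d :: e :: rest3)
        else '%' :: goB (d :: rest2)
    else c :: goB rest
termination_by l => l.length

def convert_mush_tokens_alt (text : String) : String :=
  String.ofList (goB text.toList)

-- ===== PRECONDITION & SPEC =====
def Spec_convert_mush_tokens (text : String) (out : String) : Prop := out = convert_mush_tokens_alt text
instance (text : String) (out : String) : Decidable (Spec_convert_mush_tokens text out) := by unfold Spec_convert_mush_tokens; infer_instance

-- ===== CLAIM (what is proved, stated in full; the proofs are below) =====
def Claim_equal_convert_mush_tokens : Prop := ∀ (text : String), Dom_convert_mush_tokens text → Spec_convert_mush_tokens text (convert_mush_tokens text)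

-- ===== LEMMAS AND PROOFS =====

-- one pass of Python str.replace for a nonempty pattern o :: old', written as the structural
-- recursion PySem.Chars.replace.go performs (match ⇒ emit new, skip the pattern; else copy a char)
def rep (o : Char) (old' new : List Char) : List Char → List Char
  | [] => []
  | c :: t =>
    if (o :: old').isPrefixOf (c :: t) then new ++ rep o old' new (t.drop old'.length)
    else c :: rep o old' new t
termination_by l => l.length
decreasing_by
  · simp [Nat.lt_succ_of_le (Nat.sub_le _ _)]
  · simp

lemma go_acc (old new : List Char) : ∀ (fuel : Nat) (l acc : List Char),
    PySem.Chars.replace.go old new fuel l acc = acc.reverse ++ PySem.Chars.replace.go old new fuel l [] := by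
  intro fuel
  induction fuel with
  | zero => intro l acc; simp [PySem.Chars.replace.go]
  | succ n ih =>
    intro l acc
    cases l with
    | nil => simp [PySem.Chars.replace.go]
    | cons c t =>
      simp only [PySem.Chars.replace.go]
      split
      · rw [ih _ (new.reverse ++ acc), ih _ (new.reverse ++ [])]
        simp
      · rw [ih _ (c :: acc), ih _ [c]]
        simp

lemma go_eq_rep (o : Char) (old' new : List Char) : ∀ (fuel : Nat) (l : List Char), l.length ≤ fuel →
    PySem.Chars.replace.go (o :: old') new fuel l [] = rep o old' new l := by
  intro fuel
  induction fuel with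
  | zero =>
    intro l h
    have : l = [] := List.length_eq_zero_iff.mp (Nat.le_zero.mp h)
    subst this; simp [PySem.Chars.replace.go, rep]
  | succ n ih =>
    intro l h
    cases l with
    | nil => simp [PySem.Chars.replace.go, rep]
    | cons c t =>
      simp only [PySem.Chars.replace.go, rep]
      split
      · rw [go_acc, ih]
        · simp
        · simp only [List.length_drop, List.length_cons]
          simp only [List.length_cons] at h
          omega
      · rw [go_acc, ih t (by simpa using Nat.lt_succ_iff.mp (Nat.lt_of_lt_of_le (Nat.lt_succ_self _) (by simpa using h)))]
        simp

lemma replace_eq_rep (o : Char) (old' new s : List Char) :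
    PySem.Chars.replace s (o :: old') new = rep o old' new s := by
  rw [PySem.Chars.replace]
  simp [go_eq_rep o old' new s.length s le_rfl]

lemma rep_skip {c o : Char} (h : c ≠ o) (old' new t : List Char) :
    rep o old' new (c :: t) = c :: rep o old' new t := by
  rw [rep]
  simp [List.isPrefixOf, Ne.symm h]

-- the 13 token/replacement pairs, char-list level
def toks : List (List Char × List Char) :=
  [(['r'], ['\n']), (['t'], [' ',' ',' ',' ']), (['b'], [' ']),
   (['c','r'], ['|','r']), (['c','g'], ['|','g']), (['c','y'], ['|','y']),
   (['c','b'], ['|','b']), (['c','m'], ['|','m']), (['c','c'], ['|','c']),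
   (['c','w'], ['|','w']), (['c','n'], ['|','n']), (['c','h'], ['|','h']),
   (['c','x'], ['|','x'])]

def pipe (cs : List Char) : List Char :=
  toks.foldl (fun s p => rep '%' p.1 p.2 s) cs

lemma rep_nil (o : Char) (old' new : List Char) : rep o old' new [] = [] := by rw [rep]

lemma rep_head (o : Char) (old' : List Char) (nh : Char) (nt X : List Char) :
    (rep o old' (nh :: nt) X).head? = some nh ∨ (rep o old' (nh :: nt) X).head? = X.head? := by
  cases X with
  | nil => right; rw [rep]
  | cons c t =>
    rw [rep]
    split
    · left; simp
    · right; simp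

-- 'the next character cannot be any of S': what lets a replace pass over a '%' it cannot complete
def headNe (S : List Char) (X : List Char) : Prop := ∀ y ∈ S, X.head? ≠ some y

lemma headNe_rep {S : List Char} (o : Char) (old' : List Char) {nh : Char} (nt : List Char)
    (hnh : nh ∉ S) {X : List Char} (hX : headNe S X) : headNe S (rep o old' (nh :: nt) X) := by
  intro y hy
  rcases rep_head o old' nh nt X with h | h
  · rw [h]
    intro hco
    injection hco with hh
    exact hnh (hh ▸ hy)
  · rw [h]; exact hX y hy

lemma rep_pcX {x : Char} (old2 nw : List Char) {X : List Char} (hX : X.head? ≠ some x) :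
    rep '%' (x :: old2) nw ('%' :: X) = '%' :: rep '%' (x :: old2) nw X := by
  cases X with
  | nil => rw [rep, rep]; simp [List.isPrefixOf, rep_nil]
  | cons h t =>
    rw [rep]
    have hne : ¬ x = h := fun hh => hX (by rw [List.head?_cons, hh])
    simp [List.isPrefixOf, hne]

lemma rep_pcc {y : Char} (nw : List Char) {X : List Char} (hX : X.head? ≠ some y) :
    rep '%' ['c', y] nw ('%' :: 'c' :: X) = '%' :: 'c' :: rep '%' ['c', y] nw X := by
  cases X with
  | nil => rw [rep, rep, rep]; simp [List.isPrefixOf, rep_nil]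
  | cons h t =>
    rw [rep, rep]
    have hne : ¬ y = h := fun hh => hX (by rw [List.head?_cons, hh])
    simp [List.isPrefixOf, hne]

lemma goB_nil : goB [] = [] := by rw [goB.eq_def]

lemma goB_skip {c : Char} (h : c ≠ '%') (t : List Char) : goB (c :: t) = c :: goB t := by
  rw [goB.eq_def]; simp [h]

lemma goB_r (t : List Char) : goB ('%' :: 'r' :: t) = '\n' :: goB t := by
  rw [goB.eq_def]; simp

lemma goB_t (t : List Char) : goB ('%' :: 't' :: t) = ' ' :: ' ' :: ' ' :: ' ' :: goB t := by
  rw [goB.eq_def]; simp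

lemma goB_b (t : List Char) : goB ('%' :: 'b' :: t) = ' ' :: goB t := by
  rw [goB.eq_def]; simp

lemma goB_cy {e : Char}
    (he : e = 'r' ∨ e = 'g' ∨ e = 'y' ∨ e = 'b' ∨ e = 'm' ∨ e = 'c' ∨ e = 'w' ∨ e = 'n' ∨ e = 'x' ∨ e = 'h')
    (t : List Char) : goB ('%' :: 'c' :: e :: t) = '|' :: e :: goB t := by
  rw [goB.eq_def]; simp [he]

lemma goB_c_no {e : Char}
    (he : ¬ (e = 'r' ∨ e = 'g' ∨ e = 'y' ∨ e = 'b' ∨ e = 'm' ∨ e = 'c' ∨ e = 'w' ∨ e = 'n' ∨ e = 'x' ∨ e = 'h'))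
    (t : List Char) : goB ('%' :: 'c' :: e :: t) = '%' :: goB ('c' :: e :: t) := by
  rw [goB.eq_def]; simp [he]

lemma goB_d_no {d : Char} (h1 : d ≠ 'r') (h2 : d ≠ 't') (h3 : d ≠ 'b') (h4 : d ≠ 'c')
    (t : List Char) : goB ('%' :: d :: t) = '%' :: goB (d :: t) := by
  rw [goB.eq_def]; simp [h1, h2, h3, h4]

lemma goB_pct : goB ['%'] = ['%'] := by rw [goB.eq_def]; simp

lemma goB_pc : goB ['%', 'c'] = ['%', 'c'] := by
  rw [goB.eq_def]; simp [goB_skip, goB_nil]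

lemma convert_toList (text : String) : (convert_mush_tokens text).toList = pipe text.toList := by
  simp only [convert_mush_tokens, pipe, toks, List.foldl, PySem.Str.toList_replace,
    show ("%r" : String).toList = '%' :: ['r'] from rfl,
    show ("%t" : String).toList = '%' :: ['t'] from rfl,
    show ("%b" : String).toList = '%' :: ['b'] from rfl,
    show ("%cr" : String).toList = '%' :: ['c','r'] from rfl,
    show ("%cg" : String).toList = '%' :: ['c','g'] from rfl,
    show ("%cy" : String).toList = '%' :: ['c','y'] from rfl,
    show ("%cb" : String).toList = '%' :: ['c','b'] from rfl,
    show ("%cm" : String).toList = '%' :: ['c','m'] from rfl,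
    show ("%cc" : String).toList = '%' :: ['c','c'] from rfl,
    show ("%cw" : String).toList = '%' :: ['c','w'] from rfl,
    show ("%cn" : String).toList = '%' :: ['c','n'] from rfl,
    show ("%ch" : String).toList = '%' :: ['c','h'] from rfl,
    show ("%cx" : String).toList = '%' :: ['c','x'] from rfl,
    show ("\n" : String).toList = ['\n'] from rfl,
    show ("    " : String).toList = [' ',' ',' ',' '] from rfl,
    show (" " : String).toList = [' '] from rfl,
    show ("|r" : String).toList = ['|','r'] from rfl,
    show ("|g" : String).toList = ['|','g'] from rfl,
    show ("|y" : String).toList = ['|','y'] from rfl,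
    show ("|b" : String).toList = ['|','b'] from rfl,
    show ("|m" : String).toList = ['|','m'] from rfl,
    show ("|c" : String).toList = ['|','c'] from rfl,
    show ("|w" : String).toList = ['|','w'] from rfl,
    show ("|n" : String).toList = ['|','n'] from rfl,
    show ("|h" : String).toList = ['|','h'] from rfl,
    show ("|x" : String).toList = ['|','x'] from rfl,
    replace_eq_rep]

lemma pipe_eq_goB : ∀ (n : Nat) (cs : List Char), cs.length ≤ n → pipe cs = goB cs := by
  intro n
  induction n with
  | zero =>
    intro cs h
    have : cs = [] := List.length_eq_zero_iff.mp (Nat.le_zero.mp h)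
    subst this; simp [pipe, toks, rep, goB_nil]
  | succ n ih =>
    intro cs h
    match cs with
    | [] => simp [pipe, toks, rep, goB_nil]
    | c :: t =>
      by_cases hc : c = '%'
      · subst hc
        match t with
        | [] => simp [pipe, toks, rep, List.isPrefixOf, goB_pct]
        | d :: t2 =>
          by_cases hd1 : d = 'r'
          · subst hd1
            have iht := ih t2 (by simp at h ⊢; omega)
            simp only [pipe, toks, List.foldl] at iht ⊢
            simp [rep, List.isPrefixOf, iht, goB_r]
          · by_cases hd2 : d = 't'
            · subst hd2
              have iht := ih t2 (by simp at h ⊢; omega)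
              simp only [pipe, toks, List.foldl] at iht ⊢
              simp [rep, List.isPrefixOf, iht, goB_t]
            · by_cases hd3 : d = 'b'
              · subst hd3
                have iht := ih t2 (by simp at h ⊢; omega)
                simp only [pipe, toks, List.foldl] at iht ⊢
                simp [rep, List.isPrefixOf, iht, goB_b]
              · by_cases hd4 : d = 'c'
                · subst hd4
                  match t2 with
                  | [] => simp [pipe, toks, rep, List.isPrefixOf, goB_pc]
                  | e :: t3 =>
                    by_cases he : e = 'r' ∨ e = 'g' ∨ e = 'y' ∨ e = 'b' ∨ e = 'm' ∨ e = 'c' ∨ e = 'w' ∨ e = 'n' ∨ e = 'x' ∨ e = 'h'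
                    · have iht := ih t3 (by simp at h ⊢; omega)
                      simp only [pipe, toks, List.foldl] at iht ⊢
                      rw [goB_cy he]
                      rcases he with rfl|rfl|rfl|rfl|rfl|rfl|rfl|rfl|rfl|rfl <;>
                        simp [rep, List.isPrefixOf, iht]
                    · push Not at he
                      obtain ⟨e1, e2, e3, e4, e5, e6, e7, e8, e9, e10⟩ := he
                      have iht := ih (e :: t3) (by simp at h ⊢; omega)
                      simp only [pipe, toks, List.foldl] at iht ⊢
                      rw [goB_c_no (by simp [e1,e2,e3,e4,e5,e6,e7,e8,e9,e10]),
                        goB_skip (show ('c':Char) ≠ '%' by decide)]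
                      have p0 : headNe ['r','g','y','b','m','c','w','n','x','h'] (e :: t3) := by
                        intro y hy hco
                        rw [List.head?_cons] at hco
                        injection hco with hh
                        subst hh
                        simp only [List.mem_cons, List.not_mem_nil, or_false] at hy
                        rcases hy with rfl|rfl|rfl|rfl|rfl|rfl|rfl|rfl|rfl|rfl
                        exacts [e1 rfl, e2 rfl, e3 rfl, e4 rfl, e5 rfl, e6 rfl, e7 rfl, e8 rfl, e9 rfl, e10 rfl]
                      have p1 : headNe ['r','g','y','b','m','c','w','n','x','h'] (rep '%' ['r'] ['\n'] (e :: t3)) := headNe_rep _ _ _ (by decide) p0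
                      have p2 : headNe ['r','g','y','b','m','c','w','n','x','h'] (rep '%' ['t'] [' ',' ',' ',' '] (rep '%' ['r'] ['\n'] (e :: t3))) := headNe_rep _ _ _ (by decide) p1
                      have p3 : headNe ['r','g','y','b','m','c','w','n','x','h'] (rep '%' ['b'] [' '] (rep '%' ['t'] [' ',' ',' ',' '] (rep '%' ['r'] ['\n'] (e :: t3)))) := headNe_rep _ _ _ (by decide) p2
                      have p4 : headNe ['r','g','y','b','m','c','w','n','x','h'] (rep '%' ['c','r'] ['|','r'] (rep '%' ['b'] [' '] (rep '%' ['t'] [' ',' ',' ',' '] (rep '%' ['r'] ['\n'] (e :: t3))))) := headNe_rep _ _ _ (by decide) p3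
                      have p5 : headNe ['r','g','y','b','m','c','w','n','x','h'] (rep '%' ['c','g'] ['|','g'] (rep '%' ['c','r'] ['|','r'] (rep '%' ['b'] [' '] (rep '%' ['t'] [' ',' ',' ',' '] (rep '%' ['r'] ['\n'] (e :: t3)))))) := headNe_rep _ _ _ (by decide) p4
                      have p6 : headNe ['r','g','y','b','m','c','w','n','x','h'] (rep '%' ['c','y'] ['|','y'] (rep '%' ['c','g'] ['|','g'] (rep '%' ['c','r'] ['|','r'] (rep '%' ['b'] [' '] (rep '%' ['t'] [' ',' ',' ',' '] (rep '%' ['r'] ['\n'] (e :: t3))))))) := headNe_rep _ _ _ (by decide) p5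
                      have p7 : headNe ['r','g','y','b','m','c','w','n','x','h'] (rep '%' ['c','b'] ['|','b'] (rep '%' ['c','y'] ['|','y'] (rep '%' ['c','g'] ['|','g'] (rep '%' ['c','r'] ['|','r'] (rep '%' ['b'] [' '] (rep '%' ['t'] [' ',' ',' ',' '] (rep '%' ['r'] ['\n'] (e :: t3)))))))) := headNe_rep _ _ _ (by decide) p6
                      have p8 : headNe ['r','g','y','b','m','c','w','n','x','h'] (rep '%' ['c','m'] ['|','m'] (rep '%' ['c','b'] ['|','b'] (rep '%' ['c','y'] ['|','y'] (rep '%' ['c','g'] ['|','g'] (rep '%' ['c','r'] ['|','r'] (rep '%' ['b'] [' '] (rep '%' ['t'] [' ',' ',' ',' '] (rep '%' ['r'] ['\n'] (e :: t3))))))))) := headNe_rep _ _ _ (by decide) p7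
                      have p9 : headNe ['r','g','y','b','m','c','w','n','x','h'] (rep '%' ['c','c'] ['|','c'] (rep '%' ['c','m'] ['|','m'] (rep '%' ['c','b'] ['|','b'] (rep '%' ['c','y'] ['|','y'] (rep '%' ['c','g'] ['|','g'] (rep '%' ['c','r'] ['|','r'] (rep '%' ['b'] [' '] (rep '%' ['t'] [' ',' ',' ',' '] (rep '%' ['r'] ['\n'] (e :: t3)))))))))) := headNe_rep _ _ _ (by decide) p8
                      have p10 : headNe ['r','g','y','b','m','c','w','n','x','h'] (rep '%' ['c','w'] ['|','w'] (rep '%' ['c','c'] ['|','c'] (rep '%' ['c','m'] ['|','m'] (rep '%' ['c','b'] ['|','b'] (rep '%' ['c','y'] ['|','y'] (rep '%' ['c','g'] ['|','g'] (rep '%' ['c','r'] ['|','r'] (rep '%' ['b'] [' '] (rep '%' ['t'] [' ',' ',' ',' '] (rep '%' ['r'] ['\n'] (e :: t3))))))))))) := headNe_rep _ _ _ (by decide) p9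
                      have p11 : headNe ['r','g','y','b','m','c','w','n','x','h'] (rep '%' ['c','n'] ['|','n'] (rep '%' ['c','w'] ['|','w'] (rep '%' ['c','c'] ['|','c'] (rep '%' ['c','m'] ['|','m'] (rep '%' ['c','b'] ['|','b'] (rep '%' ['c','y'] ['|','y'] (rep '%' ['c','g'] ['|','g'] (rep '%' ['c','r'] ['|','r'] (rep '%' ['b'] [' '] (rep '%' ['t'] [' ',' ',' ',' '] (rep '%' ['r'] ['\n'] (e :: t3)))))))))))) := headNe_rep _ _ _ (by decide) p10
                      have p12 : headNe ['r','g','y','b','m','c','w','n','x','h'] (rep '%' ['c','h'] ['|','h'] (rep '%' ['c','n'] ['|','n'] (rep '%' ['c','w'] ['|','w'] (rep '%' ['c','c'] ['|','c'] (rep '%' ['c','m'] ['|','m'] (rep '%' ['c','b'] ['|','b'] (rep '%' ['c','y'] ['|','y'] (rep '%' ['c','g'] ['|','g'] (rep '%' ['c','r'] ['|','r'] (rep '%' ['b'] [' '] (rep '%' ['t'] [' ',' ',' ',' '] (rep '%' ['r'] ['\n'] (e :: t3))))))))))))) := headNe_rep _ _ _ (by decide) p11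
                      have p13 : headNe ['r','g','y','b','m','c','w','n','x','h'] (rep '%' ['c','x'] ['|','x'] (rep '%' ['c','h'] ['|','h'] (rep '%' ['c','n'] ['|','n'] (rep '%' ['c','w'] ['|','w'] (rep '%' ['c','c'] ['|','c'] (rep '%' ['c','m'] ['|','m'] (rep '%' ['c','b'] ['|','b'] (rep '%' ['c','y'] ['|','y'] (rep '%' ['c','g'] ['|','g'] (rep '%' ['c','r'] ['|','r'] (rep '%' ['b'] [' '] (rep '%' ['t'] [' ',' ',' ',' '] (rep '%' ['r'] ['\n'] (e :: t3)))))))))))))) := headNe_rep _ _ _ (by decide) p12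
                      rw [rep_pcX _ _ (show ('c'::e::t3).head? ≠ some 'r' by simp),
                        rep_skip (show ('c':Char) ≠ '%' by decide),
                        rep_pcX _ _ (show ('c'::rep '%' ['r'] ['\n'] (e::t3)).head? ≠ some 't' by simp),
                        rep_skip (show ('c':Char) ≠ '%' by decide),
                        rep_pcX _ _ (show ('c'::rep '%' ['t'] [' ',' ',' ',' '] (rep '%' ['r'] ['\n'] (e::t3))).head? ≠ some 'b' by simp),
                        rep_skip (show ('c':Char) ≠ '%' by decide),
                        rep_pcc _ (p3 'r' (by decide)),
                        rep_pcc _ (p4 'g' (by decide)),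
                        rep_pcc _ (p5 'y' (by decide)),
                        rep_pcc _ (p6 'b' (by decide)),
                        rep_pcc _ (p7 'm' (by decide)),
                        rep_pcc _ (p8 'c' (by decide)),
                        rep_pcc _ (p9 'w' (by decide)),
                        rep_pcc _ (p10 'n' (by decide)),
                        rep_pcc _ (p11 'h' (by decide)),
                        rep_pcc _ (p12 'x' (by decide))]
                      rw [iht]
                · have iht := ih (d :: t2) (by simp at h ⊢; omega)
                  simp only [pipe, toks, List.foldl] at iht ⊢
                  rw [goB_d_no hd1 hd2 hd3 hd4]
                  have p0 : headNe ['r','t','b','c'] (d :: t2) := by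
                    intro y hy hco
                    rw [List.head?_cons] at hco
                    injection hco with hh
                    subst hh
                    simp only [List.mem_cons, List.not_mem_nil, or_false] at hy
                    rcases hy with rfl|rfl|rfl|rfl
                    exacts [hd1 rfl, hd2 rfl, hd3 rfl, hd4 rfl]
                  have p1 : headNe ['r','t','b','c'] (rep '%' ['r'] ['\n'] (d :: t2)) := headNe_rep _ _ _ (by decide) p0
                  have p2 : headNe ['r','t','b','c'] (rep '%' ['t'] [' ',' ',' ',' '] (rep '%' ['r'] ['\n'] (d :: t2))) := headNe_rep _ _ _ (by decide) p1
                  have p3 : headNe ['r','t','b','c'] (rep '%' ['b'] [' '] (rep '%' ['t'] [' ',' ',' ',' '] (rep '%' ['r'] ['\n'] (d :: t2)))) := headNe_rep _ _ _ (by decide) p2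
                  have p4 : headNe ['r','t','b','c'] (rep '%' ['c','r'] ['|','r'] (rep '%' ['b'] [' '] (rep '%' ['t'] [' ',' ',' ',' '] (rep '%' ['r'] ['\n'] (d :: t2))))) := headNe_rep _ _ _ (by decide) p3
                  have p5 : headNe ['r','t','b','c'] (rep '%' ['c','g'] ['|','g'] (rep '%' ['c','r'] ['|','r'] (rep '%' ['b'] [' '] (rep '%' ['t'] [' ',' ',' ',' '] (rep '%' ['r'] ['\n'] (d :: t2)))))) := headNe_rep _ _ _ (by decide) p4
                  have p6 : headNe ['r','t','b','c'] (rep '%' ['c','y'] ['|','y'] (rep '%' ['c','g'] ['|','g'] (rep '%' ['c','r'] ['|','r'] (rep '%' ['b'] [' '] (rep '%' ['t'] [' ',' ',' ',' '] (rep '%' ['r'] ['\n'] (d :: t2))))))) := headNe_rep _ _ _ (by decide) p5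
                  have p7 : headNe ['r','t','b','c'] (rep '%' ['c','b'] ['|','b'] (rep '%' ['c','y'] ['|','y'] (rep '%' ['c','g'] ['|','g'] (rep '%' ['c','r'] ['|','r'] (rep '%' ['b'] [' '] (rep '%' ['t'] [' ',' ',' ',' '] (rep '%' ['r'] ['\n'] (d :: t2)))))))) := headNe_rep _ _ _ (by decide) p6
                  have p8 : headNe ['r','t','b','c'] (rep '%' ['c','m'] ['|','m'] (rep '%' ['c','b'] ['|','b'] (rep '%' ['c','y'] ['|','y'] (rep '%' ['c','g'] ['|','g'] (rep '%' ['c','r'] ['|','r'] (rep '%' ['b'] [' '] (rep '%' ['t'] [' ',' ',' ',' '] (rep '%' ['r'] ['\n'] (d :: t2))))))))) := headNe_rep _ _ _ (by decide) p7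
                  have p9 : headNe ['r','t','b','c'] (rep '%' ['c','c'] ['|','c'] (rep '%' ['c','m'] ['|','m'] (rep '%' ['c','b'] ['|','b'] (rep '%' ['c','y'] ['|','y'] (rep '%' ['c','g'] ['|','g'] (rep '%' ['c','r'] ['|','r'] (rep '%' ['b'] [' '] (rep '%' ['t'] [' ',' ',' ',' '] (rep '%' ['r'] ['\n'] (d :: t2)))))))))) := headNe_rep _ _ _ (by decide) p8
                  have p10 : headNe ['r','t','b','c'] (rep '%' ['c','w'] ['|','w'] (rep '%' ['c','c'] ['|','c'] (rep '%' ['c','m'] ['|','m'] (rep '%' ['c','b'] ['|','b'] (rep '%' ['c','y'] ['|','y'] (rep '%' ['c','g'] ['|','g'] (rep '%' ['c','r'] ['|','r'] (rep '%' ['b'] [' '] (rep '%' ['t'] [' ',' ',' ',' '] (rep '%' ['r'] ['\n'] (d :: t2))))))))))) := headNe_rep _ _ _ (by decide) p9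
                  have p11 : headNe ['r','t','b','c'] (rep '%' ['c','n'] ['|','n'] (rep '%' ['c','w'] ['|','w'] (rep '%' ['c','c'] ['|','c'] (rep '%' ['c','m'] ['|','m'] (rep '%' ['c','b'] ['|','b'] (rep '%' ['c','y'] ['|','y'] (rep '%' ['c','g'] ['|','g'] (rep '%' ['c','r'] ['|','r'] (rep '%' ['b'] [' '] (rep '%' ['t'] [' ',' ',' ',' '] (rep '%' ['r'] ['\n'] (d :: t2)))))))))))) := headNe_rep _ _ _ (by decide) p10
                  have p12 : headNe ['r','t','b','c'] (rep '%' ['c','h'] ['|','h'] (rep '%' ['c','n'] ['|','n'] (rep '%' ['c','w'] ['|','w'] (rep '%' ['c','c'] ['|','c'] (rep '%' ['c','m'] ['|','m'] (rep '%' ['c','b'] ['|','b'] (rep '%' ['c','y'] ['|','y'] (rep '%' ['c','g'] ['|','g'] (rep '%' ['c','r'] ['|','r'] (rep '%' ['b'] [' '] (rep '%' ['t'] [' ',' ',' ',' '] (rep '%' ['r'] ['\n'] (d :: t2))))))))))))) := headNe_rep _ _ _ (by decide) p11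
                  have p13 : headNe ['r','t','b','c'] (rep '%' ['c','x'] ['|','x'] (rep '%' ['c','h'] ['|','h'] (rep '%' ['c','n'] ['|','n'] (rep '%' ['c','w'] ['|','w'] (rep '%' ['c','c'] ['|','c'] (rep '%' ['c','m'] ['|','m'] (rep '%' ['c','b'] ['|','b'] (rep '%' ['c','y'] ['|','y'] (rep '%' ['c','g'] ['|','g'] (rep '%' ['c','r'] ['|','r'] (rep '%' ['b'] [' '] (rep '%' ['t'] [' ',' ',' ',' '] (rep '%' ['r'] ['\n'] (d :: t2)))))))))))))) := headNe_rep _ _ _ (by decide) p12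
                  rw [rep_pcX _ _ (p0 'r' (by decide)),
                    rep_pcX _ _ (p1 't' (by decide)),
                    rep_pcX _ _ (p2 'b' (by decide)),
                    rep_pcX _ _ (p3 'c' (by decide)),
                    rep_pcX _ _ (p4 'c' (by decide)),
                    rep_pcX _ _ (p5 'c' (by decide)),
                    rep_pcX _ _ (p6 'c' (by decide)),
                    rep_pcX _ _ (p7 'c' (by decide)),
                    rep_pcX _ _ (p8 'c' (by decide)),
                    rep_pcX _ _ (p9 'c' (by decide)),
                    rep_pcX _ _ (p10 'c' (by decide)),
                    rep_pcX _ _ (p11 'c' (by decide)),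
                    rep_pcX _ _ (p12 'c' (by decide))]
                  rw [iht]
      · have iht := ih t (by simp at h ⊢; omega)
        simp only [pipe, toks, List.foldl] at iht ⊢
        rw [goB_skip hc]
        simp [rep_skip hc, iht]

-- ===== VERDICT (by name: the statement is the Claim_ definition above) =====
theorem convert_mush_tokens_spec : Claim_equal_convert_mush_tokens := by
  intro text _
  show _ = _
  rw [convert_mush_tokens_alt, ← pipe_eq_goB text.toList.length _ le_rfl, ← convert_toList,
    String.ofList_toList]
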